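-- pv_equiv track=rewrite | github.com/anooplab/pyar | afir/fragment.py | get_fragment_string
-- ===== SOURCE A (Python) =====
-- def get_fragment_string(all_xyz_file_atom_number):
--     """This function will make the lines specified by the dftd3 code
--        (modified by A. Anoop & M. Waller) for fragment file.
--     """
--     init = 1
--     final = 0
--     line = []
--     for i in range(len(all_xyz_file_atom_number)):
--         final += int(all_xyz_file_atom_number[i])
--         string = str(init) + "-" + str(final)
--         init = final + 1
--         line.append(string)
--     return line
-- ===== SOURCE B (Python) =====
-- def get_fragment_string(all_xyz_file_atom_number):
--     # build the table of cumulative boundaries, then format consecutive pairs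
--     bounds = [0]
--     for x in all_xyz_file_atom_number:
--         bounds.append(bounds[-1] + int(x))
--     return [str(p + 1) + "-" + str(c) for p, c in zip(bounds, bounds[1:])]
-- ===== Notes on version B (the rewrite author's own statement) =====
-- stated objective: alternative
-- what changed: replaces the interleaved accumulate-and-emit loop carrying (init, final) state with two passes: first build the full list of cumulative boundaries, then zip consecutive boundaries and format each pair as '{prev+1}-{cur}'
import Mathlib
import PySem

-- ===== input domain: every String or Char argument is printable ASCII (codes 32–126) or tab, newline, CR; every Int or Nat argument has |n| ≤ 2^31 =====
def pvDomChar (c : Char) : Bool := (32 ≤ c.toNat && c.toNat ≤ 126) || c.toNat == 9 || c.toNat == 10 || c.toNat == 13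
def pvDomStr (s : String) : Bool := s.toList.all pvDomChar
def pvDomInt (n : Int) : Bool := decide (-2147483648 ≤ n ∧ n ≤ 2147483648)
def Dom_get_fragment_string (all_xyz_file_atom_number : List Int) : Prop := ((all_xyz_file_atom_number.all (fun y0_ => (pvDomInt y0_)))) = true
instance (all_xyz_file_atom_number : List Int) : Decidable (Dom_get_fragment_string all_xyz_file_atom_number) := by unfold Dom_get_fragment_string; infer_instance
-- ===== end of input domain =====

-- B builds the table of cumulative boundaries first and then formats consecutive
-- pairs, instead of A's single loop carrying (init, final) state (objective: alternative).

-- ===== PORT A =====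
-- A's loop: state (init, final, line); each step: final += x, emit, init := final + 1.
def pvLoopA : List Int → Int → Int → List String → List String
  | [], _, _, line => line
  | x :: xs, init, final, line =>
    let final' := final + x
    let s := PySem.Int.toStr init ++ "-" ++ PySem.Int.toStr final'
    pvLoopA xs (final' + 1) final' (line ++ [s])

def get_fragment_string (all_xyz_file_atom_number : List Int) : List String :=
  pvLoopA all_xyz_file_atom_number 1 0 []

-- ===== PORT B =====
-- first pass: cumulative boundaries (bounds[-1] + x appended each step)
def pvBounds : Int → List Int → List Int
  | _, [] => []
  | last, x :: xs => (last + x) :: pvBounds (last + x) xs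

def get_fragment_string_alt (all_xyz_file_atom_number : List Int) : List String :=
  let bounds : List Int := 0 :: pvBounds 0 all_xyz_file_atom_number
  (bounds.zip bounds.tail).map (fun p => PySem.Int.toStr (p.1 + 1) ++ "-" ++ PySem.Int.toStr p.2)

-- ===== PRECONDITION & SPEC =====
def Spec_get_fragment_string (all_xyz_file_atom_number : List Int) (out : List String) : Prop := out = get_fragment_string_alt all_xyz_file_atom_number
instance (all_xyz_file_atom_number : List Int) (out : List String) : Decidable (Spec_get_fragment_string all_xyz_file_atom_number out) := by unfold Spec_get_fragment_string; infer_instance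

-- ===== CLAIM (what is proved, stated in full; the proofs are below) =====
def Claim_equal_get_fragment_string : Prop := ∀ (all_xyz_file_atom_number : List Int), Dom_get_fragment_string all_xyz_file_atom_number → Spec_get_fragment_string all_xyz_file_atom_number (get_fragment_string all_xyz_file_atom_number)

-- ===== LEMMAS AND PROOFS =====
theorem pvLoopA_eq_zip (xs : List Int) : ∀ (f : Int) (acc : List String),
    pvLoopA xs (f + 1) f acc =
      acc ++ (((f :: pvBounds f xs).zip (pvBounds f xs)).map
        (fun p => PySem.Int.toStr (p.1 + 1) ++ "-" ++ PySem.Int.toStr p.2)) := by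
  induction xs with
  | nil => intro f acc; simp [pvLoopA, pvBounds]
  | cons x xs ih =>
    intro f acc
    simp only [pvLoopA, pvBounds, List.zip_cons_cons, List.map_cons]
    rw [ih (f + x)]
    simp

theorem get_fragment_string_spec : Claim_equal_get_fragment_string := by
  intro xs _
  unfold Spec_get_fragment_string get_fragment_string get_fragment_string_alt
  have h := pvLoopA_eq_zip xs 0 []
  simpa using h
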